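-- pv_equiv track=rewrite | github.com/ShubhamSGupta/Python-Web-Development | new_search.py | nsearch4letters
-- ===== SOURCE A (Python) =====
-- def nsearch4letters(phrase:str , letter:str = 'aeiou') -> list :
-- 	content = []
-- 	found={}
-- 	for l in phrase :
-- 		if l in letter :
-- 			found.setdefault(l, 0)
-- 			found[l] += 1
-- 	for k,v in sorted(found.items()):
-- 		content.append([])
-- 		item = str(k)+' was found '+str(v)+' time(s).'
-- 		content[-1] = str(item)
-- 	return content
-- ===== SOURCE B (Python) =====
-- def nsearch4letters(phrase: str, letter: str = 'aeiou') -> list: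
--     out = []
--     for ch in sorted(set(letter)):
--         n = phrase.count(ch)
--         if n:
--             out.append(ch + ' was found ' + str(n) + ' time(s).')
--     return out
-- ===== Notes on version B (the rewrite author's own statement) =====
-- stated objective: faster
-- what changed: Replaces the single dict-accumulating per-character pass over phrase (then sorting the dict items) with a loop over the sorted distinct characters of letter, counting each with one phrase.count scan and keeping only positive counts.
import Mathlib
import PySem

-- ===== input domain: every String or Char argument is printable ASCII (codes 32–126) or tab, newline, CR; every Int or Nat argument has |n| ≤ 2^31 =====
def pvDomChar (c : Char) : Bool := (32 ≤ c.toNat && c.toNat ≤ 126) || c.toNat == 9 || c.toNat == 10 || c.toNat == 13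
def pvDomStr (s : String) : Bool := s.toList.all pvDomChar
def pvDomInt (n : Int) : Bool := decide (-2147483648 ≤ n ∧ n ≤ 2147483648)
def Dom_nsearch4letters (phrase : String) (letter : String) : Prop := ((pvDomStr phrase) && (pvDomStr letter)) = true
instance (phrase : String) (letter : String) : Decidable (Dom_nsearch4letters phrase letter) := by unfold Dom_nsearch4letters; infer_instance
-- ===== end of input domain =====

-- B replaces A's single dict-accumulating pass over phrase with one phrase.count scan per
-- sorted distinct character of letter (measured faster: phrase.count replaces per-character dict updates).

-- ===== PORT A =====
def nsearch4letters (phrase : String) (letter : String) : List String :=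
  -- content = []; found = {}
  -- for l in phrase: if l in letter: found.setdefault(l, 0); found[l] += 1
  -- ('l in letter' for the single character l is character membership; 'found[l] += 1' reads a
  --  key that is always present after the setdefault, so the getD 0 default is never used)
  let found : PySem.Dict Char Int :=
    phrase.toList.foldl
      (fun found l =>
        if letter.toList.contains l then
          let found := found.setdefault l 0
          found.insert l (found.getD l 0 + 1)
        else found)
      PySem.Dict.empty
  -- for k,v in sorted(found.items()): content.append([]); item = …; content[-1] = str(item)
  -- (append([]) followed by content[-1] = item nets to appending the string item)
  (PySem.List.sorted2 found.items Prod.fst Prod.snd).foldl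
    (fun content kv =>
      content ++ [String.singleton kv.1 ++ " was found " ++ PySem.Int.toStr kv.2 ++ " time(s)."])
    []

-- ===== PORT B =====
def nsearch4letters_alt (phrase : String) (letter : String) : List String :=
  -- for ch in sorted(set(letter)): n = phrase.count(ch); if n: out.append(…)
  (PySem.List.sorted (PySem.Set.ofList letter.toList) (fun c => c)).foldl
    (fun out ch =>
      let n : Int := (PySem.Str.count phrase (String.singleton ch) : Int)
      if n ≠ 0 then
        out ++ [String.singleton ch ++ " was found " ++ PySem.Int.toStr n ++ " time(s)."]
      else out)
    []

-- ===== PRECONDITION & SPEC =====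
def Spec_nsearch4letters (phrase : String) (letter : String) (out : List String) : Prop := out = nsearch4letters_alt phrase letter
instance (phrase : String) (letter : String) (out : List String) : Decidable (Spec_nsearch4letters phrase letter out) := by unfold Spec_nsearch4letters; infer_instance

-- ===== CLAIM (what is proved, stated in full; the proofs are below) =====
def Claim_equal_nsearch4letters : Prop := ∀ (phrase : String) (letter : String), Dom_nsearch4letters phrase letter → Spec_nsearch4letters phrase letter (nsearch4letters phrase letter)

-- ===== LEMMAS AND PROOFS =====

-- Python's s.count(c) for a single character c is the character count.
theorem charsCount_go_singleton (ch : Char) (l : List Char) (fuel : Nat) (acc : Nat)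
    (h : l.length ≤ fuel) :
    PySem.Chars.count.go [ch] fuel l acc = acc + l.count ch := by
  induction fuel generalizing l acc with
  | zero =>
    have : l = [] := List.eq_nil_of_length_eq_zero (Nat.le_zero.mp h)
    subst this; simp [PySem.Chars.count.go]
  | succ n ih =>
    cases l with
    | nil => simp [PySem.Chars.count.go]
    | cons x t =>
      have ht : t.length ≤ n := by simpa using h
      by_cases hx : ch = x
      · subst hx
        simp only [PySem.Chars.count.go]
        have hp : [ch].isPrefixOf (ch :: t) = true := by simp [List.isPrefixOf]
        rw [hp]
        simp [ih _ _ ht]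
        omega
      · simp only [PySem.Chars.count.go]
        have hp : [ch].isPrefixOf (x :: t) = false := by
          simp [List.isPrefixOf]
          exact hx
        rw [hp]
        simp [ih _ _ ht, List.count_cons]
        exact fun hxx => hx hxx.symm

theorem strCount_singleton (s : String) (ch : Char) :
    PySem.Str.count s (String.singleton ch) = s.toList.count ch := by
  rw [PySem.Str.count_eq]
  have h1 : (String.singleton ch).toList = [ch] := by simp [String.singleton]
  rw [h1]
  simp [PySem.Chars.count, charsCount_go_singleton ch s.toList s.length 0 (by simp)]

-- the body of A's loop is the counter step
theorem stepA_eq (d : PySem.Dict Char Int) (l : Char) :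
    (let d' := d.setdefault l 0; d'.insert l (d'.getD l 0 + 1))
      = d.insert l (d.getD l 0 + 1) := by
  by_cases h : d.contains l = true
  · simp [PySem.Dict.setdefault_of_contains d _ h]
  · have h' : d.contains l = false := by simpa using h
    have hget : d.get? l = none := by
      have := PySem.Dict.contains_eq_isSome_get? d l
      rw [h'] at this
      exact Option.not_isSome_iff_eq_none.mp (by simp [← this])
    have hgd : d.getD l 0 = 0 := PySem.Dict.getD_of_get?_eq_none d 0 hget
    rw [PySem.Dict.setdefault_of_not_contains d _ h']
    simp [PySem.Dict.getD_insert_self, PySem.Dict.insert_insert_self, hgd]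

-- insertBy only compares against elements of the accumulator
theorem insertBy_congr {α : Type} (b1 b2 : α → α → Bool) (x : α) (acc : List α)
    (h : ∀ y ∈ acc, b1 x y = b2 x y) :
    PySem.List.insertBy b1 x acc = PySem.List.insertBy b2 x acc := by
  induction acc with
  | nil => rfl
  | cons y ys ih =>
    simp only [PySem.List.insertBy]
    rw [h y (by simp)]
    by_cases hb : b2 x y = true
    · simp [hb]
    · simp [hb, ih (fun z hz => h z (by simp [hz]))]

theorem foldl_insertBy_congr {α : Type} (b1 b2 : α → α → Bool) (S : List α)
    (hS : ∀ x ∈ S, ∀ y ∈ S, b1 x y = b2 x y) :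
    ∀ (xs acc : List α), (∀ x ∈ xs, x ∈ S) → (∀ y ∈ acc, y ∈ S) →
    xs.foldl (fun acc x => PySem.List.insertBy b1 x acc) acc
      = xs.foldl (fun acc x => PySem.List.insertBy b2 x acc) acc := by
  intro xs
  induction xs with
  | nil => intro acc _ _; rfl
  | cons x t ih =>
    intro acc hxs hacc
    have hx : x ∈ S := hxs x (by simp)
    simp only [List.foldl_cons]
    rw [insertBy_congr b1 b2 x acc (fun y hy => hS x hx y (hacc y hy))]
    exact ih _ (fun z hz => hxs z (by simp [hz])) (fun y hy => by
      rcases (PySem.List.mem_insertBy b2 x y acc).mp hy with h | h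
      · exact h ▸ hx
      · exact hacc y h)

-- on a list whose elements are determined by their first component,
-- Python's tuple sort is the sort by first component
theorem sorted2_eq_sorted_fst (items : List (Char × Int))
    (hdet : ∀ a ∈ items, ∀ b ∈ items, a.1 = b.1 → a = b) :
    PySem.List.sorted2 items Prod.fst Prod.snd = PySem.List.sorted items Prod.fst := by
  simp only [PySem.List.sorted2, PySem.List.sorted]
  apply foldl_insertBy_congr _ _ items _ items [] (fun x hx => hx) (by simp)
  intro a ha b hb
  rcases lt_trichotomy a.1 b.1 with h | h | h
  · simp [h, not_lt_of_gt h]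
  · have : a = b := hdet a ha b hb h
    subst this; simp
  · simp [h, not_lt_of_gt h]


-- Prop-test variant of PySem.List.foldl_append_if
theorem foldl_append_ite {α β : Type} (p : α → Prop) [DecidablePred p] (f : α → β)
    (l : List α) (acc : List β) :
    l.foldl (fun acc x => if p x then acc ++ [f x] else acc) acc
      = acc ++ (l.filter (fun x => decide (p x))).map f := by
  induction l generalizing acc with
  | nil => simp
  | cons x t ih =>
    by_cases h : p x
    · simp [h, ih]
    · simp [h, ih]

-- characterisation of port A: the sorted distinct matched characters, formatted with their counts
theorem portA_eq (phrase letter : String) :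
    nsearch4letters phrase letter
      = (PySem.List.sorted
           (PySem.Set.ofList (phrase.toList.filter (fun c => letter.toList.contains c)))
           (fun k => k)).map
          (fun k => String.singleton k ++ " was found "
              ++ PySem.Int.toStr ((phrase.toList.count k : Int)) ++ " time(s).") := by
  simp only [nsearch4letters]
  -- the loop body is the counter step
  have hstep : (fun (found : PySem.Dict Char Int) (l : Char) =>
      if letter.toList.contains l then
        (let found' := found.setdefault l 0; found'.insert l (found'.getD l 0 + 1))
      else found)
      = fun found l => if letter.toList.contains l
          then found.insert l (found.getD l 0 + 1) else found := by
    funext d l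
    by_cases h : letter.toList.contains l = true <;> simp only [h, if_true, stepA_eq d l]
  rw [hstep, ← List.foldl_filter, PySem.Dict.foldl_insert_getD_add_one_eq_counter,
      PySem.Dict.items_counter]
  -- the items are determined by their keys, so the tuple sort is the key sort
  rw [sorted2_eq_sorted_fst _ (by
    intro a ha b hb hfst
    obtain ⟨k, hk, rfl⟩ := List.mem_map.mp ha
    obtain ⟨k', hk', rfl⟩ := List.mem_map.mp hb
    simp only at hfst
    subst hfst
    rfl)]
  -- sorting the mapped items by fst is mapping over the sorted keys
  rw [PySem.List.sorted_eq_of_perm_of_pairwise_lt _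
        ((PySem.List.sorted (PySem.Set.ofList (phrase.toList.filter
            (fun c => letter.toList.contains c))) (fun k => k)).map
          (fun k => (k, ((phrase.toList.filter (fun c => letter.toList.contains c)).count k : Int))))
        Prod.fst
        ((PySem.List.sorted_perm _ _ _).map _)
        (by
          rw [List.pairwise_map]
          exact PySem.List.sorted_ofList_pairwise_lt _)]
  rw [PySem.List.foldl_append_singleton_eq_map, List.nil_append, List.map_map]
  apply List.map_congr_left
  intro k hk
  have hk' : k ∈ phrase.toList.filter (fun c => letter.toList.contains c) := by
    rw [PySem.List.mem_sorted] at hk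
    exact (PySem.Set.mem_ofList _ _).mp hk
  have hmem : (fun c => letter.toList.contains c) k = true := (List.mem_filter.mp hk').2
  simp only [Function.comp_def]
  rw [List.count_filter (by simpa using hmem)]

-- characterisation of port B: formatted positive-count characters of sorted(set(letter))
theorem portB_eq (phrase letter : String) :
    nsearch4letters_alt phrase letter
      = ((PySem.List.sorted (PySem.Set.ofList letter.toList) (fun c => c)).filter
           (fun c => decide (((phrase.toList.count c : Int)) ≠ 0))).map
          (fun k => String.singleton k ++ " was found "
              ++ PySem.Int.toStr ((phrase.toList.count k : Int)) ++ " time(s).") := by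
  simp only [nsearch4letters_alt, strCount_singleton]
  rw [foldl_append_ite (fun ch => ((phrase.toList.count ch : Int)) ≠ 0)
        (fun ch => String.singleton ch ++ " was found "
            ++ PySem.Int.toStr ((phrase.toList.count ch : Int)) ++ " time(s).")]
  simp

-- the two key lists coincide
theorem keys_eq (phrase letter : String) :
    PySem.List.sorted
        (PySem.Set.ofList (phrase.toList.filter (fun c => letter.toList.contains c)))
        (fun k => k)
      = (PySem.List.sorted (PySem.Set.ofList letter.toList) (fun c => c)).filter
          (fun c => decide (((phrase.toList.count c : Int)) ≠ 0)) := by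
  have hpw : ((PySem.List.sorted (PySem.Set.ofList letter.toList) (fun c => c)).filter
      (fun c => decide (((phrase.toList.count c : Int)) ≠ 0))).Pairwise (· < ·) :=
    (PySem.List.sorted_ofList_pairwise_lt _).filter _
  apply PySem.List.sorted_eq_of_perm_of_pairwise_lt _ _ _ _ hpw
  apply List.perm_of_nodup_nodup_toFinset_eq
  · exact hpw.imp ne_of_lt
  · exact PySem.Set.nodup_ofList _
  · ext a
    simp [List.mem_filter, PySem.List.mem_sorted, PySem.Set.mem_ofList, List.count_eq_zero]
    tauto

-- ===== VERDICT (by name: the statement is the Claim_ definition above) =====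
theorem nsearch4letters_spec : Claim_equal_nsearch4letters := by
  intro phrase letter _
  unfold Spec_nsearch4letters
  rw [portA_eq, portB_eq, keys_eq]
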